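-- pv_equiv track=rewrite | github.com/LiddleChild/expense-migrator | banking.py | filter_cell_value
-- ===== SOURCE A (Python) =====
-- def filter_cell_value(expr: str) -> tuple[list[str], list[str]]:
--     cell_in, cell_out = [], []
--     for value in expr.split("+"):
--         for i, m in enumerate(value.split("-")):
--             if i == 0:
--                 cell_out.append(m)
--             else:
--                 cell_in.append(m)
--
--     return (cell_in, cell_out)
-- ===== SOURCE B (Python) =====
-- def filter_cell_value(expr: str) -> tuple[list[str], list[str]]:
--     # Single left-to-right scan: accumulate the current token; a '+' or '-'
--     # flushes it to the list chosen by the *previous* delimiter ('+'/start -> out,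
--     # '-' -> in) and selects the destination of the next token.
--     cell_in, cell_out = [], []
--     buf = []
--     to_out = True
--     for ch in expr:
--         if ch == "+" or ch == "-":
--             (cell_out if to_out else cell_in).append("".join(buf))
--             buf = []
--             to_out = ch == "+"
--         else:
--             buf.append(ch)
--     (cell_out if to_out else cell_in).append("".join(buf))
--     return (cell_in, cell_out)
-- ===== Notes on version B (the rewrite author's own statement) =====
-- stated objective: alternative
-- what changed: Replaces the nested split-on-'+'-then-split-on-'-' double loop with a single character scan that flushes the current token to cell_out or cell_in according to the delimiter preceding it.
import Mathlib
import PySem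

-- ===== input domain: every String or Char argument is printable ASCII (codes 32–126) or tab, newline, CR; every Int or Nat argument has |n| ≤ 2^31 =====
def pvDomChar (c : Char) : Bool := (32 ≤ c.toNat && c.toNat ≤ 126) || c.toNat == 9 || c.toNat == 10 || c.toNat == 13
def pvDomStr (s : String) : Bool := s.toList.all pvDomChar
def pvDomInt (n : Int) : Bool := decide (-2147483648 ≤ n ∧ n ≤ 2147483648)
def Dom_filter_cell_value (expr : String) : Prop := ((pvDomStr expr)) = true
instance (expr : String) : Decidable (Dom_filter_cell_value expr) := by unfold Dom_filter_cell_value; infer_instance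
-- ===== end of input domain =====

-- B replaces A's nested split-on-'+'-then-split-on-'-' with one linear character scan; alternative decomposition, same cost.

-- ===== PORT A =====
-- expr.split("+") / value.split("-"): sep is a nonempty literal, so str.split is PySem.Chars.splitOn (the sep ≠ "" form)
def filter_cell_value (expr : String) : List String × List String :=
  ((PySem.Chars.splitOn expr.toList ['+']).map String.ofList).foldl
    (fun (st : List String × List String) value =>
      (PySem.List.enumerate ((PySem.Chars.splitOn value.toList ['-']).map String.ofList) 0).foldl
        (fun (st : List String × List String) im =>
          if im.1 = 0 then (st.1, st.2 ++ [im.2]) else (st.1 ++ [im.2], st.2)) st)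
    ([], [])

-- ===== PORT B =====
-- the scan loop of Source B: buf accumulates the current token, toOut remembers the preceding delimiter
def altLoop : List Char → List Char → Bool → List String → List String → List String × List String
  | [], buf, toOut, ci, co =>
      if toOut then (ci, co ++ [String.ofList buf]) else (ci ++ [String.ofList buf], co)
  | c :: cs, buf, toOut, ci, co =>
      if c = '+' ∨ c = '-' then
        altLoop cs [] (c = '+')
          (if toOut then ci else ci ++ [String.ofList buf])
          (if toOut then co ++ [String.ofList buf] else co)
      else altLoop cs (buf ++ [c]) toOut ci co

def filter_cell_value_alt (expr : String) : List String × List String :=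
  altLoop expr.toList [] true [] []

-- ===== PRECONDITION & SPEC =====
def Spec_filter_cell_value (expr : String) (out : List String × List String) : Prop := out = filter_cell_value_alt expr
instance (expr : String) (out : List String × List String) : Decidable (Spec_filter_cell_value expr out) := by unfold Spec_filter_cell_value; infer_instance

-- ===== CLAIM (what is proved, stated in full; the proofs are below) =====
def Claim_equal_filter_cell_value : Prop := ∀ (expr : String), Dom_filter_cell_value expr → Spec_filter_cell_value expr (filter_cell_value expr)

-- ===== LEMMAS AND PROOFS =====

-- structural (fuel-free) form of PySem.Chars.splitOn for a one-character separator
def mySplit (d : Char) : List Char → List Char → List (List Char)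
  | [], cur => [cur.reverse]
  | c :: rest, cur => if c = d then cur.reverse :: mySplit d rest [] else mySplit d rest (c :: cur)

lemma go_eq_mySplit (d : Char) :
    ∀ (l : List Char) (fuel : Nat) (cur : List Char) (acc : List (List Char)),
      l.length ≤ fuel →
      PySem.Chars.splitOn.go [d] fuel l cur acc = acc.reverse ++ mySplit d l cur := by
  intro l
  induction l with
  | nil =>
    intro fuel cur acc _
    cases fuel <;> simp [PySem.Chars.splitOn.go, mySplit]
  | cons c rest ih =>
    intro fuel cur acc hle
    cases fuel with
    | zero => simp at hle
    | succ f =>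
      by_cases h : c = d
      · have hstep : PySem.Chars.splitOn.go [d] (f+1) (c :: rest) cur acc
            = PySem.Chars.splitOn.go [d] f rest [] (cur.reverse :: acc) := by
          simp [PySem.Chars.splitOn.go, List.isPrefixOf, h]
        rw [hstep, ih f [] (cur.reverse :: acc) (by simpa using hle)]
        simp [mySplit, h]
      · have hstep : PySem.Chars.splitOn.go [d] (f+1) (c :: rest) cur acc
            = PySem.Chars.splitOn.go [d] f rest (c :: cur) acc := by
          simp [PySem.Chars.splitOn.go, List.isPrefixOf]
          exact fun h' => absurd h'.symm h
        rw [hstep, ih f (c :: cur) acc (by simpa using hle)]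
        simp [mySplit, h]

def sD (d : Char) (l : List Char) : List (List Char) := mySplit d l []

lemma splitOn_eq_sD (d : Char) (l : List Char) :
    PySem.Chars.splitOn l [d] = sD d l := by
  have := go_eq_mySplit d l (l.length + 1) [] [] (by omega)
  simpa [PySem.Chars.splitOn, sD] using this

lemma mySplit_ne_nil (d : Char) : ∀ (l cur : List Char), mySplit d l cur ≠ [] := by
  intro l
  induction l with
  | nil => intro cur; simp [mySplit]
  | cons c rest ih =>
    intro cur
    by_cases h : c = d <;> simp [mySplit, h] <;> exact ih _

lemma mySplit_acc (d : Char) :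
    ∀ (l cur : List Char),
      mySplit d l cur = (cur.reverse ++ (mySplit d l []).headD []) :: (mySplit d l []).tail := by
  intro l
  induction l with
  | nil => intro cur; simp [mySplit]
  | cons c rest ih =>
    intro cur
    by_cases h : c = d
    · simp [mySplit, h]
    · have h1 := ih (c :: cur)
      have h2 := ih [c]
      simp only [mySplit, if_neg h] at *
      rw [h1, h2]
      simp

lemma sD_ne_nil (d : Char) (l : List Char) : sD d l ≠ [] := mySplit_ne_nil d l []

lemma sD_nil (d : Char) : sD d [] = [[]] := by simp [sD, mySplit]

lemma sD_delim (d : Char) (rest : List Char) : sD d (d :: rest) = [] :: sD d rest := by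
  simp [sD, mySplit]

lemma sD_other {d c : Char} (h : c ≠ d) (rest : List Char) :
    sD d (c :: rest) = (c :: (sD d rest).headD []) :: (sD d rest).tail := by
  have := mySplit_acc d rest [c]
  simp only [sD, mySplit, if_neg h]
  simpa using this

lemma cons_headD_tail {α : Type} (l : List α) (d₀ : α) (h : l ≠ []) :
    l = l.headD d₀ :: l.tail := by
  cases l with
  | nil => simp at h
  | cons a t => simp

-- A's result, characterised per side: out-tokens and in-tokens of the char list
def insA (cs : List Char) : List (List Char) :=
  (sD '+' cs).flatMap (fun v => (sD '-' v).tail)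

def outsA (cs : List Char) : List (List Char) :=
  (sD '+' cs).map (fun v => (sD '-' v).headD [])

lemma outsA_reconstruct (cs : List Char) :
    outsA cs = (outsA cs).headD [] :: (outsA cs).tail := by
  apply cons_headD_tail
  simp [outsA, sD_ne_nil]

lemma F1_ins : insA [] = [] := by simp [insA, sD_nil]
lemma F1_outs : outsA [] = [[]] := by simp [outsA, sD_nil]

lemma F2_ins (cs : List Char) : insA ('+' :: cs) = insA cs := by
  simp [insA, sD_delim, sD_nil]

lemma F2_outs (cs : List Char) : outsA ('+' :: cs) = [] :: outsA cs := by
  simp [outsA, sD_delim, sD_nil]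

lemma F3_ins (cs : List Char) : insA ('-' :: cs) = (outsA cs).headD [] :: insA cs := by
  have hplus := cons_headD_tail (sD '+' cs) [] (sD_ne_nil '+' cs)
  rw [insA, sD_other (by decide) cs, List.flatMap_cons, sD_delim]
  rw [cons_headD_tail (sD '-' ((sD '+' cs).headD [])) [] (sD_ne_nil _ _)]
  conv_rhs => rw [outsA, insA, hplus]
  simp

lemma F3_outs (cs : List Char) : outsA ('-' :: cs) = [] :: (outsA cs).tail := by
  rw [outsA, sD_other (by decide) cs, List.map_cons, sD_delim]
  conv_rhs => rw [outsA, cons_headD_tail (sD '+' cs) [] (sD_ne_nil '+' cs)]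
  simp

lemma F4_ins {c : Char} (hp : c ≠ '+') (hm : c ≠ '-') (cs : List Char) :
    insA (c :: cs) = insA cs := by
  rw [insA, sD_other hp cs, List.flatMap_cons, sD_other hm]
  conv_rhs => rw [insA, cons_headD_tail (sD '+' cs) [] (sD_ne_nil '+' cs)]
  simp

lemma F4_outs {c : Char} (hp : c ≠ '+') (hm : c ≠ '-') (cs : List Char) :
    outsA (c :: cs) = (c :: (outsA cs).headD []) :: (outsA cs).tail := by
  rw [outsA, sD_other hp cs, List.map_cons, sD_other hm]
  conv_rhs => rw [outsA, cons_headD_tail (sD '+' cs) [] (sD_ne_nil '+' cs)]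
  simp

-- the B scan loop computes exactly the insA/outsA decomposition
lemma altLoop_spec :
    ∀ (cs buf : List Char) (ci co : List String),
      altLoop cs buf true ci co
        = (ci ++ (insA cs).map String.ofList,
           co ++ String.ofList (buf ++ (outsA cs).headD []) :: ((outsA cs).tail).map String.ofList)
      ∧ altLoop cs buf false ci co
        = (ci ++ String.ofList (buf ++ (outsA cs).headD []) :: (insA cs).map String.ofList,
           co ++ ((outsA cs).tail).map String.ofList) := by
  intro cs
  induction cs with
  | nil =>
    intro buf ci co
    constructor <;> simp [altLoop, F1_ins, F1_outs]
  | cons c cs ih =>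
    intro buf ci co
    by_cases hp : c = '+'
    · subst hp
      constructor
      · rw [show altLoop ('+' :: cs) buf true ci co
              = altLoop cs [] true ci (co ++ [String.ofList buf]) from by simp [altLoop]]
        rw [(ih [] ci (co ++ [String.ofList buf])).1, F2_ins, F2_outs]
        conv_rhs => rw [outsA_reconstruct cs]
        simp
      · rw [show altLoop ('+' :: cs) buf false ci co
              = altLoop cs [] true (ci ++ [String.ofList buf]) co from by simp [altLoop]]
        rw [(ih [] (ci ++ [String.ofList buf]) co).1, F2_ins, F2_outs]
        conv_rhs => rw [outsA_reconstruct cs]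
        simp
    · by_cases hm : c = '-'
      · subst hm
        constructor
        · rw [show altLoop ('-' :: cs) buf true ci co
                = altLoop cs [] false ci (co ++ [String.ofList buf]) from by simp [altLoop]]
          rw [(ih [] ci (co ++ [String.ofList buf])).2, F3_ins, F3_outs]
          simp
        · rw [show altLoop ('-' :: cs) buf false ci co
                = altLoop cs [] false (ci ++ [String.ofList buf]) co from by simp [altLoop]]
          rw [(ih [] (ci ++ [String.ofList buf]) co).2, F3_ins, F3_outs]
          simp
      · have hstep : ∀ t, altLoop (c :: cs) buf t ci co = altLoop cs (buf ++ [c]) t ci co := by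
          intro t; simp [altLoop, hp, hm]
        constructor
        · rw [hstep, (ih (buf ++ [c]) ci co).1, F4_ins hp hm, F4_outs hp hm]
          simp
        · rw [hstep, (ih (buf ++ [c]) ci co).2, F4_ins hp hm, F4_outs hp hm]
          simp

-- A's inner loop after index 0 appends everything to cell_in
lemma inner_tail_fold (ms : List String) :
    ∀ (k : Int) (ci co : List String), 1 ≤ k →
      (PySem.List.enumerate ms k).foldl
        (fun (st : List String × List String) im =>
          if im.1 = 0 then (st.1, st.2 ++ [im.2]) else (st.1 ++ [im.2], st.2)) (ci, co)
      = (ci ++ ms, co) := by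
  induction ms with
  | nil => intro k ci co _; simp [PySem.List.enumerate_nil]
  | cons m ms ih =>
    intro k ci co hk
    rw [PySem.List.enumerate_cons]
    simp only [List.foldl_cons]
    rw [if_neg (by simpa using (by omega : ¬ (k = 0)))]
    rw [ih (k + 1) (ci ++ [m]) co (by omega)]
    simp

-- A's inner loop over one chunk: head to cell_out, tail to cell_in
lemma chunk_fold (w : List Char) (ci co : List String) :
    (PySem.List.enumerate ((PySem.Chars.splitOn (String.ofList w).toList ['-']).map String.ofList) 0).foldl
        (fun (st : List String × List String) im =>
          if im.1 = 0 then (st.1, st.2 ++ [im.2]) else (st.1 ++ [im.2], st.2)) (ci, co)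
      = (ci ++ ((sD '-' w).tail).map String.ofList, co ++ [String.ofList ((sD '-' w).headD [])]) := by
  rw [show (String.ofList w).toList = w from by simp, splitOn_eq_sD]
  rw [cons_headD_tail (sD '-' w) [] (sD_ne_nil '-' w)]
  rw [List.map_cons, PySem.List.enumerate_cons]
  simp only [List.foldl_cons, reduceIte, zero_add, List.headD_cons, List.tail_cons]
  exact inner_tail_fold (((sD '-' w).tail).map String.ofList) 1 ci
    (co ++ [String.ofList ((sD '-' w).headD [])]) (by omega)

-- A's outer loop over the '+'-chunks
lemma outer_fold (ws : List (List Char)) :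
    ∀ (ci co : List String),
      ((ws.map String.ofList).foldl
        (fun (st : List String × List String) value =>
          (PySem.List.enumerate ((PySem.Chars.splitOn value.toList ['-']).map String.ofList) 0).foldl
            (fun (st : List String × List String) im =>
              if im.1 = 0 then (st.1, st.2 ++ [im.2]) else (st.1 ++ [im.2], st.2)) st)
        (ci, co))
      = (ci ++ (ws.flatMap (fun v => ((sD '-' v).tail).map String.ofList)),
         co ++ ws.map (fun v => String.ofList ((sD '-' v).headD []))) := by
  induction ws with
  | nil => intro ci co; simp
  | cons w ws ih =>
    intro ci co
    simp only [List.map_cons, List.foldl_cons]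
    rw [chunk_fold w ci co, ih]
    simp

theorem A_eq (expr : String) :
    filter_cell_value expr
      = ((insA expr.toList).map String.ofList, (outsA expr.toList).map String.ofList) := by
  rw [filter_cell_value, splitOn_eq_sD, outer_fold (sD '+' expr.toList) [] []]
  simp [insA, outsA, List.map_flatMap]

-- ===== VERDICT (by name: the statement is the Claim_ definition above) =====
theorem filter_cell_value_spec : Claim_equal_filter_cell_value := by
  intro expr _
  unfold Spec_filter_cell_value
  rw [A_eq, filter_cell_value_alt]
  have h := (altLoop_spec expr.toList [] [] []).1
  rw [h]
  rw [outsA_reconstruct expr.toList]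
  simp
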